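-- pv_equiv track=rewrite | github.com/Aacashh/AI-based-Petrophysical-Analysis | shared/ml_splicing.py | get_recommended_correlation_curve
-- ===== SOURCE A (Python) =====
-- from typing import Tuple, Dict, Optional, List, NamedTuple
--
-- def get_recommended_correlation_curve(common_curves: List[str]) -> Optional[str]:
--     """
--     Get recommended curve for correlation.
--
--     Priority: GR > RHOB > NPHI > first available
--
--     Args:
--         common_curves: List of available curve names
--
--     Returns:
--         Recommended curve name or None
--     """
--     priority = ['GR', 'GRC', 'SGR', 'CGR', 'RHOB', 'RHOZ', 'NPHI', 'TNPH']
--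
--     upper_curves = {c.upper(): c for c in common_curves}
--
--     for p in priority:
--         if p in upper_curves:
--             return upper_curves[p]
--
--     # Return first non-depth curve
--     depth_names = {'DEPT', 'DEPTH', 'MD', 'TVD'}
--     for c in common_curves:
--         if c.upper() not in depth_names:
--             return c
--
--     return None
-- ===== SOURCE B (Python) =====
-- def get_recommended_correlation_curve(common_curves):
--     priority = ['GR', 'GRC', 'SGR', 'CGR', 'RHOB', 'RHOZ', 'NPHI', 'TNPH']
--     best = None
--     best_rank = len(priority)
--     fallback = None
--     for c in common_curves:
--         u = c.upper()
--         if u in priority and priority.index(u) < best_rank: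
--             best_rank = priority.index(u)
--             best = c
--         if fallback is None and u not in ('DEPT', 'DEPTH', 'MD', 'TVD'):
--             fallback = c
--     if best is not None:
--         return best
--     return fallback
-- ===== Notes on version B (the rewrite author's own statement) =====
-- stated objective: alternative
-- what changed: Single forward pass keeping the best-ranked priority curve and the first non-depth fallback together, instead of A's precomputed upper-case dict plus a staged lookup loop per priority; Pre_ excludes lists where two curves share the same upper-cased priority name, on which A's dict-reinsertion (last-duplicate-wins) order is accidental.
-- outside the precondition, e.g. on get_recommended_correlation_curve(['gr', 'GR']): A returns 'GR', B returns 'gr'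
import Mathlib
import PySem

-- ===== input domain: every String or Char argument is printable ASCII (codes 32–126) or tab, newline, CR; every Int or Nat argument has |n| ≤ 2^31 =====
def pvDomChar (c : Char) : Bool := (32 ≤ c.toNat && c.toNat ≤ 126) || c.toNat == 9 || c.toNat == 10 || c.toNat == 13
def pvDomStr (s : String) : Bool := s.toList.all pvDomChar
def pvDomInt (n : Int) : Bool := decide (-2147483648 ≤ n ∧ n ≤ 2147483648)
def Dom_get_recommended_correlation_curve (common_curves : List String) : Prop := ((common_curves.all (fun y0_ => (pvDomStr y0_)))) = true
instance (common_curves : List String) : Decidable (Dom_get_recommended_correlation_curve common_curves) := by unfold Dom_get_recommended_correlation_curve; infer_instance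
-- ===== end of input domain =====

-- B replaces A's precomputed upper-case dict + staged priority lookups by one forward pass
-- keeping the best-ranked priority curve and the first non-depth fallback (objective: alternative).

-- the priority list shared by both programs' sources
def pvPriority : List String := ["GR", "GRC", "SGR", "CGR", "RHOB", "RHOZ", "NPHI", "TNPH"]

-- ===== PORT A =====
-- "for p in priority: if p in upper_curves: return upper_curves[p]"
def aPriorityLoop (d : PySem.Dict String String) : List String → Option String
  | [] => none
  | p :: ps => if d.contains p then d.get? p else aPriorityLoop d ps

-- "for c in common_curves: if c.upper() not in depth_names: return c"
def aFallback : List String → Option String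
  | [] => none
  | c :: cs => if PySem.Str.upper c ∈ ["DEPT", "DEPTH", "MD", "TVD"] then aFallback cs else some c

def get_recommended_correlation_curve (common_curves : List String) : Option String :=
  match aPriorityLoop
      (common_curves.foldl (fun d c => d.insert (PySem.Str.upper c) c) PySem.Dict.empty)
      pvPriority with
  | some v => some v
  | none => aFallback common_curves

-- ===== PORT B =====
-- loop body of Source B: state = (best, best_rank, fallback).
-- "u in priority and priority.index(u) < best_rank" is ported as a match on
-- PySem.List.index? (some i ↔ membership; i is exactly priority.index(u)).
def bStep (s : Option String × Int × Option String) (c : String) :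
    Option String × Int × Option String :=
  let u := PySem.Str.upper c
  let (best, bestRank, fallback) := s
  let (best, bestRank) :=
    match PySem.List.index? pvPriority u with
    | some i => if (i : Int) < bestRank then (some c, (i : Int)) else (best, bestRank)
    | none => (best, bestRank)
  let fallback :=
    if fallback = none ∧ ¬ (u ∈ ["DEPT", "DEPTH", "MD", "TVD"]) then some c else fallback
  (best, bestRank, fallback)

-- "if best is not None: return best" / "return fallback"
def get_recommended_correlation_curve_alt (common_curves : List String) : Option String :=
  match common_curves.foldl bStep (none, (8 : Int), none) with
  | (some b, _, _) => some b
  | (none, _, fallback) => fallback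

-- ===== PRECONDITION & SPEC =====
-- Pre_ excludes lists in which some priority name is the upper-cased form of more than one
-- list position: there A's dict comprehension overwrites duplicates (last-duplicate-wins),
-- an accidental tie-break that B (first-wins) does not reproduce.
def Pre_get_recommended_correlation_curve (common_curves : List String) : Prop :=
  ∀ p ∈ pvPriority, common_curves.countP (fun c => PySem.Str.upper c == p) ≤ 1
instance (common_curves : List String) : Decidable (Pre_get_recommended_correlation_curve common_curves) := by unfold Pre_get_recommended_correlation_curve; infer_instance

def pvWitness_get_recommended_correlation_curve : List String := ["DEPT", "cali", "rhob", "GR"]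

def Spec_get_recommended_correlation_curve (common_curves : List String) (out : Option String) : Prop := out = get_recommended_correlation_curve_alt common_curves
instance (common_curves : List String) (out : Option String) : Decidable (Spec_get_recommended_correlation_curve common_curves out) := by unfold Spec_get_recommended_correlation_curve; infer_instance

-- ===== CLAIM (what is proved, stated in full; the proofs are below) =====
def Claim_equal_get_recommended_correlation_curve : Prop := ∀ (common_curves : List String), Dom_get_recommended_correlation_curve common_curves → Pre_get_recommended_correlation_curve common_curves → Spec_get_recommended_correlation_curve common_curves (get_recommended_correlation_curve common_curves)

-- ===== LEMMAS AND PROOFS =====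

-- last match of p in cs, as the dict-overwrite computes it
def lastMatch (cs : List String) (p : String) : Option String :=
  cs.foldl (fun last c => if PySem.Str.upper c == p then some c else last) none

def firstMatch : List String → String → Option String
  | [], _ => none
  | c :: cs, p => if PySem.Str.upper c == p then some c else firstMatch cs p

def stagedFirst (cs : List String) : List String → Option String
  | [] => none
  | p :: ps => match firstMatch cs p with
    | some v => some v
    | none => stagedFirst cs ps

def stagedLast (cs : List String) : List String → Option String
  | [] => none
  | p :: ps => match lastMatch cs p with
    | some v => some v
    | none => stagedLast cs ps

-- best priority match of cs (rank into ps, first occurrence wins ties)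
def specW (ps : List String) : List String → Option (Nat × String)
  | [] => none
  | c :: cs => match PySem.List.index? ps (PySem.Str.upper c), specW ps cs with
    | none, r => r
    | some i, none => some (i, c)
    | some i, some (j, d) => if i ≤ j then some (i, c) else some (j, d)

-- dict lookup after the insert loop = last-match accumulator scan
theorem get?_foldl_insert_upper (cs : List String) (d : PySem.Dict String String) (p : String) :
    (cs.foldl (fun d c => d.insert (PySem.Str.upper c) c) d).get? p
      = cs.foldl (fun last c => if PySem.Str.upper c == p then some c else last) (d.get? p) := by
  induction cs generalizing d with
  | nil => rfl
  | cons c cs ih =>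
    simp only [List.foldl_cons, ih]
    congr 1
    rw [PySem.Dict.get?_insert]
    by_cases h : PySem.Str.upper c = p
    · simp [h]
    · simp [h, Ne.symm h]

theorem aPriorityLoop_eq_stagedLast (cs : List String) (ps : List String) :
    aPriorityLoop (cs.foldl (fun d c => d.insert (PySem.Str.upper c) c) PySem.Dict.empty) ps
      = stagedLast cs ps := by
  induction ps with
  | nil => rfl
  | cons p ps ih =>
    have hget : (cs.foldl (fun d c => d.insert (PySem.Str.upper c) c) PySem.Dict.empty).get? p
        = lastMatch cs p := get?_foldl_insert_upper cs PySem.Dict.empty p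
    simp only [aPriorityLoop, stagedLast, ih, PySem.Dict.contains_eq_isSome_get?, hget]
    cases lastMatch cs p <;> simp

theorem foldl_lastMatch_no_match (cs : List String) (p : String) (s : Option String)
    (h : ∀ c ∈ cs, ¬ (PySem.Str.upper c == p) = true) :
    cs.foldl (fun last c => if PySem.Str.upper c == p then some c else last) s = s := by
  induction cs generalizing s with
  | nil => rfl
  | cons c cs ih =>
    have hc := h c (by simp)
    simp only [List.foldl_cons, if_neg hc]
    exact ih _ (fun c hc' => h c (by simp [hc']))

theorem lastMatch_eq_firstMatch (cs : List String) (p : String)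
    (h : cs.countP (fun c => PySem.Str.upper c == p) ≤ 1) :
    lastMatch cs p = firstMatch cs p := by
  induction cs with
  | nil => rfl
  | cons c cs ih =>
    rw [List.countP_cons] at h
    by_cases hc : (PySem.Str.upper c == p) = true
    · rw [if_pos hc] at h
      have hcount : cs.countP (fun c => PySem.Str.upper c == p) = 0 := by omega
      have hno : ∀ c' ∈ cs, ¬ (PySem.Str.upper c' == p) = true :=
        fun c' hc' => List.countP_eq_zero.mp hcount c' hc'
      simp only [lastMatch, firstMatch, List.foldl_cons, if_pos hc]
      exact foldl_lastMatch_no_match cs p (some c) hno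
    · rw [if_neg hc] at h
      simp only [lastMatch, firstMatch, List.foldl_cons, if_neg hc]
      exact ih (by omega)

theorem stagedLast_eq_stagedFirst (cs : List String) (ps : List String)
    (h : ∀ p ∈ ps, cs.countP (fun c => PySem.Str.upper c == p) ≤ 1) :
    stagedLast cs ps = stagedFirst cs ps := by
  induction ps with
  | nil => rfl
  | cons p ps ih =>
    simp only [stagedLast, stagedFirst, lastMatch_eq_firstMatch cs p (h p (by simp))]
    cases firstMatch cs p with
    | some v => rfl
    | none => exact ih (fun q hq => h q (by simp [hq]))

theorem specW_nil_ps (cs : List String) : specW [] cs = none := by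
  induction cs with
  | nil => rfl
  | cons c cs ih => simp [specW, ih, PySem.List.index?]

theorem specW_cons (p : String) (ps : List String) (cs : List String) :
    specW (p :: ps) cs = match firstMatch cs p with
      | some c => some (0, c)
      | none => (specW ps cs).map (fun q => (q.1 + 1, q.2)) := by
  induction cs with
  | nil => rfl
  | cons c cs ih =>
    by_cases hc : PySem.Str.upper c = p
    · have hI : PySem.List.index? (p :: ps) (PySem.Str.upper c) = some 0 := by
        rw [hc]; exact PySem.List.index?_cons_self p ps
      have hcb : (PySem.Str.upper c == p) = true := by simp [hc]
      simp only [specW, hI, firstMatch, if_pos hcb, ih]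
      cases hfm : firstMatch cs p with
      | some d => simp
      | none => cases hs : specW ps cs <;> simp
    · have hne : ¬ (PySem.Str.upper c == p) = true := by simp [hc]
      have hpc : p ≠ PySem.Str.upper c := fun h => hc h.symm
      have hI : PySem.List.index? (p :: ps) (PySem.Str.upper c)
          = (PySem.List.index? ps (PySem.Str.upper c)).map (· + 1) :=
        PySem.List.index?_cons_of_ne ps hpc
      simp only [specW, hI, firstMatch, if_neg hne, ih]
      cases hfm : firstMatch cs p with
      | some d =>
        cases hI' : PySem.List.index? ps (PySem.Str.upper c) with
        | none => simp
        | some i => simp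
      | none =>
        cases hI' : PySem.List.index? ps (PySem.Str.upper c) with
        | none => simp
        | some i =>
          cases hs : specW ps cs with
          | none => simp
          | some q =>
            simp only [Option.map_some]
            by_cases hij : i ≤ q.1 <;> simp [hij]

theorem stagedFirst_eq_specW (ps : List String) (cs : List String) :
    stagedFirst cs ps = (specW ps cs).map (·.2) := by
  induction ps generalizing cs with
  | nil => simp [stagedFirst, specW_nil_ps]
  | cons p ps ih =>
    rw [specW_cons]
    simp only [stagedFirst, ih]
    cases hfm : firstMatch cs p with
    | some v => simp
    | none => cases specW ps cs <;> simp

theorem specW_rank_lt (ps cs : List String) (j : Nat) (d : String)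
    (h : specW ps cs = some (j, d)) : j < ps.length := by
  induction cs generalizing j d with
  | nil => simp [specW] at h
  | cons c cs ih =>
    simp only [specW] at h
    cases hI : PySem.List.index? ps (PySem.Str.upper c) with
    | none => rw [hI] at h; exact ih j d h
    | some i =>
      have hi : i < ps.length := by
        obtain ⟨hk, -, -⟩ := PySem.List.getElem_of_index?_eq_some hI
        exact hk
      rw [hI] at h
      cases hs : specW ps cs with
      | none =>
        rw [hs] at h
        simp only [Option.some.injEq, Prod.mk.injEq] at h
        omega
      | some q =>
        obtain ⟨a, b⟩ := q
        rw [hs] at h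
        have hrec := ih a b hs
        by_cases hij : i ≤ a
        · simp only [if_pos hij, Option.some.injEq, Prod.mk.injEq] at h
          omega
        · simp only [if_neg hij, Option.some.injEq, Prod.mk.injEq] at h
          omega

-- the (best, best_rank) part of B's fold
def stepPair (s : Option String × Int) (c : String) : Option String × Int :=
  match PySem.List.index? pvPriority (PySem.Str.upper c) with
  | some i => if (i : Int) < s.2 then (some c, (i : Int)) else s
  | none => s

def stepFb (f : Option String) (c : String) : Option String :=
  if f = none ∧ ¬ (PySem.Str.upper c ∈ ["DEPT", "DEPTH", "MD", "TVD"]) then some c else f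

theorem foldl_bStep_split (cs : List String) (b : Option String) (r : Int) (f : Option String) :
    cs.foldl bStep (b, r, f)
      = ((cs.foldl stepPair (b, r)).1, (cs.foldl stepPair (b, r)).2, cs.foldl stepFb f) := by
  induction cs generalizing b r f with
  | nil => rfl
  | cons c cs ih =>
    have hstep : bStep (b, r, f) c = ((stepPair (b, r) c).1, (stepPair (b, r) c).2, stepFb f c) := by
      simp only [bStep, stepPair, stepFb, PySem.List.index?_eq_idxOf?]
    simp only [List.foldl_cons, hstep]
    exact ih _ _ _

def combinePair (s : Option String × Int) (r : Option (Nat × String)) : Option String × Int :=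
  match r with
  | none => s
  | some (j, d) => if (j : Int) < s.2 then (some d, (j : Int)) else s

theorem foldl_stepPair_eq (cs : List String) (s : Option String × Int) :
    cs.foldl stepPair s = combinePair s (specW pvPriority cs) := by
  induction cs generalizing s with
  | nil => rfl
  | cons c cs ih =>
    simp only [List.foldl_cons, ih, specW, PySem.List.index?_eq_idxOf?]
    cases hI : List.idxOf? (PySem.Str.upper c) pvPriority with
    | none => simp [stepPair, PySem.List.index?_eq_idxOf?, hI]
    | some i =>
      cases hs : specW pvPriority cs with
      | none =>
        simp only [stepPair, PySem.List.index?_eq_idxOf?, hI, combinePair]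
      | some q =>
        obtain ⟨j, d⟩ := q
        simp only [stepPair, PySem.List.index?_eq_idxOf?, hI, combinePair]
        by_cases hij : i ≤ j
        · simp only [if_pos hij]
          by_cases hlt : (i : Int) < s.2
          · have hji : ¬ (j : Int) < (i : Int) := by omega
            simp [hlt, hji]
          · have hj : ¬ (j : Int) < s.2 := by omega
            simp [hlt, hj]
        · simp only [if_neg hij]
          by_cases hlt : (i : Int) < s.2
          · have hji : (j : Int) < (i : Int) := by omega
            have hj : (j : Int) < s.2 := by omega
            simp [hlt, hji, hj]
          · simp [hlt]

theorem foldl_stepFb_some (cs : List String) (x : String) :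
    cs.foldl stepFb (some x) = some x := by
  induction cs with
  | nil => rfl
  | cons c cs ih => simp only [List.foldl_cons, stepFb]; simp [ih]

theorem foldl_stepFb_eq_aFallback (cs : List String) :
    cs.foldl stepFb none = aFallback cs := by
  induction cs with
  | nil => rfl
  | cons c cs ih =>
    simp only [List.foldl_cons, stepFb, aFallback]
    by_cases hd : PySem.Str.upper c ∈ ["DEPT", "DEPTH", "MD", "TVD"]
    · simp [hd, ih]
    · simp [hd, foldl_stepFb_some]

-- B computes: best priority match (first occurrence wins) else first non-depth curve
theorem alt_eq (cs : List String) :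
    get_recommended_correlation_curve_alt cs
      = match (specW pvPriority cs).map (·.2) with
        | some v => some v
        | none => aFallback cs := by
  unfold get_recommended_correlation_curve_alt
  rw [foldl_bStep_split, foldl_stepPair_eq, foldl_stepFb_eq_aFallback]
  cases hs : specW pvPriority cs with
  | none => rfl
  | some q =>
    obtain ⟨j, d⟩ := q
    have hj : j < pvPriority.length := specW_rank_lt _ _ _ _ hs
    have hj8 : (j : Int) < 8 := by
      have h8 : pvPriority.length = 8 := rfl
      omega
    simp [combinePair, hj8]

-- ===== VERDICT (by name: the statement is the Claim_ definition above) =====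
theorem get_recommended_correlation_curve_spec : Claim_equal_get_recommended_correlation_curve := by
  intro cs _ hpre
  unfold Spec_get_recommended_correlation_curve get_recommended_correlation_curve
  rw [alt_eq, aPriorityLoop_eq_stagedLast,
    stagedLast_eq_stagedFirst cs pvPriority hpre, stagedFirst_eq_specW]
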